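-- pv_equiv track=rewrite | github.com/didi/WorkTrans | basefile/laborCnt/service/manpower_forecast_service2.py | is_line_meet_req
-- ===== SOURCE A (Python) =====
-- from typing import List, Dict, Any, Union, Tuple
--
-- def is_line_meet_req(line_item: List[str], min_len: int, max_len: int, time_interval: int) -> bool:
--     """
--     line是否符合规定
--     :param line_item:
--     :param min_len:
--     :param max_len:
--     :param time_interval:
--     :return:
--     """
--     shift_len = 0
--     for task in line_item:
--         if not task:
--             if shift_len:
--                 break
--             else:
--                 continue
--         else:
--             shift_len += 1
--     if min_len <= shift_len * time_interval <= max_len: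
--         return True
--     return False
-- ===== SOURCE B (Python) =====
-- def _rle(xs):
--     """Run-length encode the truthiness of xs as [(flag, count), ...]."""
--     runs = []
--     for x in xs:
--         k = bool(x)
--         if runs and runs[-1][0] == k:
--             runs[-1] = (k, runs[-1][1] + 1)
--         else:
--             runs.append((k, 1))
--     return runs
--
-- def is_line_meet_req(line_item, min_len, max_len, time_interval):
--     shift_len = next((n for k, n in _rle(line_item) if k), 0)
--     return min_len <= shift_len * time_interval <= max_len
-- ===== Notes on version B (the rewrite author's own statement) =====
-- stated objective: alternative
-- what changed: B run-length-encodes the truthiness of the whole list into (flag, count) runs and then reads off the length of the first truthy run, instead of A's single accumulator loop with break/continue.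
import Mathlib
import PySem

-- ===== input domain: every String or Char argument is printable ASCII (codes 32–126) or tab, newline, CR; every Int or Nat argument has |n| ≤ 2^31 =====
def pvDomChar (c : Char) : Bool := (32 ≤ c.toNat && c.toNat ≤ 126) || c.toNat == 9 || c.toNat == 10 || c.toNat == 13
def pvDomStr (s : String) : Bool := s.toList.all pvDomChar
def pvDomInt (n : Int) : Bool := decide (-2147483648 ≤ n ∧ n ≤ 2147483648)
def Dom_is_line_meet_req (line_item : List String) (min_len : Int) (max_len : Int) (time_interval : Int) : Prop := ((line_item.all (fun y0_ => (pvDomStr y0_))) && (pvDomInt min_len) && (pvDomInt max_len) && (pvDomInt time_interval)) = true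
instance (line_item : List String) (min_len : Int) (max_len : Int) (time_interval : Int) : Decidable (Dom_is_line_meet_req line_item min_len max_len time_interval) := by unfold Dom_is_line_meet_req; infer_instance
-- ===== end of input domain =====

-- B replaces A's break/continue accumulator loop by a run-length encoding of the
-- whole list's truthiness followed by a lookup of the first truthy run (alternative
-- decomposition, same cost).


-- ===== PORT A =====
-- A's for-loop over line_item with accumulator shift_len, `continue` on a leading
-- empty task, `break` on an empty task once shift_len ≠ 0.
def pvLoopA : List String → Int → Int
  | [], shift_len => shift_len
  | task :: rest, shift_len =>
    if task = "" then
      (if shift_len ≠ 0 then shift_len else pvLoopA rest shift_len)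
    else pvLoopA rest (shift_len + 1)

def is_line_meet_req (line_item : List String) (min_len : Int) (max_len : Int) (time_interval : Int) : Bool :=
  let shift_len := pvLoopA line_item 0
  if min_len ≤ shift_len * time_interval ∧ shift_len * time_interval ≤ max_len then true else false

-- ===== PORT B =====
-- Source B's _rle loop body: either bump the count of the last run (runs[-1]) or append
-- a fresh (flag, 1) run.
def pvRLEstep (runs : List (Bool × Int)) (x : String) : List (Bool × Int) :=
  let k : Bool := x ≠ ""
  match runs.getLast? with
  | some (k', n) => if k' = k then runs.dropLast ++ [(k, n + 1)] else runs ++ [(k, 1)]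
  | none => runs ++ [(k, 1)]

def pvRLE (xs : List String) : List (Bool × Int) := xs.foldl pvRLEstep []

-- Source B's `next((n for k, n in runs if k), 0)`: first truthy run's length, default 0.
def pvFirstTrue : List (Bool × Int) → Int
  | [] => 0
  | (k, n) :: rest => if k then n else pvFirstTrue rest

def is_line_meet_req_alt (line_item : List String) (min_len : Int) (max_len : Int) (time_interval : Int) : Bool :=
  let shift_len := pvFirstTrue (pvRLE line_item)
  decide (min_len ≤ shift_len * time_interval ∧ shift_len * time_interval ≤ max_len)

-- ===== PRECONDITION & SPEC =====
def Spec_is_line_meet_req (line_item : List String) (min_len : Int) (max_len : Int) (time_interval : Int) (out : Bool) : Prop := out = is_line_meet_req_alt line_item min_len max_len time_interval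
instance (line_item : List String) (min_len : Int) (max_len : Int) (time_interval : Int) (out : Bool) : Decidable (Spec_is_line_meet_req line_item min_len max_len time_interval out) := by unfold Spec_is_line_meet_req; infer_instance

-- ===== CLAIM (what is proved, stated in full; the proofs are below) =====
def Claim_equal_is_line_meet_req : Prop := ∀ (line_item : List String) (min_len : Int) (max_len : Int) (time_interval : Int), Dom_is_line_meet_req line_item min_len max_len time_interval → Spec_is_line_meet_req line_item min_len max_len time_interval (is_line_meet_req line_item min_len max_len time_interval)

-- ===== LEMMAS AND PROOFS =====
-- Specification-side helpers: leading-empty trim and leading non-empty run length.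
def pvDropEmpty : List String → List String
  | [] => []
  | t :: rest => if t = "" then pvDropEmpty rest else t :: rest

def pvCountRun : List String → Int
  | [] => 0
  | t :: rest => if t = "" then 0 else pvCountRun rest + 1

-- Once the run has started (0 < s), A's loop just adds the leading run of xs.
theorem pvLoopA_pos (xs : List String) (s : Int) (hs : 0 < s) :
    pvLoopA xs s = s + pvCountRun xs := by
  induction xs generalizing s with
  | nil => simp [pvLoopA, pvCountRun]
  | cons t rest ih =>
    by_cases ht : t = "" <;> simp [pvLoopA, pvCountRun, ht, show s ≠ 0 by omega]
    rw [ih (s + 1) (by omega)]; ring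

theorem pvLoopA_zero (xs : List String) :
    pvLoopA xs 0 = pvCountRun (pvDropEmpty xs) := by
  induction xs with
  | nil => rfl
  | cons t rest ih =>
    by_cases ht : t = ""
    · simpa [pvLoopA, pvDropEmpty, ht] using ih
    · simp [pvLoopA, pvDropEmpty, pvCountRun, ht, pvLoopA_pos rest 1 (by omega)]
      ring

-- Front-recursive description of run-length encoding continued from a pending run (k, n).
def pvRLEF (k : Bool) (n : Int) : List String → List (Bool × Int)
  | [] => [(k, n)]
  | x :: xs =>
    if (x ≠ "" : Bool) = k then pvRLEF k (n + 1) xs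
    else (k, n) :: pvRLEF (x ≠ "") 1 xs

-- The foldl with a nonempty accumulator equals the prefix plus the front recursion.
theorem foldl_rlestep (xs : List String) (acc : List (Bool × Int)) (k : Bool) (n : Int) :
    List.foldl pvRLEstep (acc ++ [(k, n)]) xs = acc ++ pvRLEF k n xs := by
  induction xs generalizing acc k n with
  | nil => simp [pvRLEF]
  | cons x rest ih =>
    by_cases hk : (x ≠ "" : Bool) = k
    · simp only [List.foldl_cons, pvRLEstep, pvRLEF, hk, if_pos]
      rw [List.getLast?_concat]
      simp only [List.dropLast_concat]
      exact ih acc k (n + 1)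
    · have hne : ¬(k = decide (x ≠ "")) := fun h => hk h.symm
      have h2 := ih (acc ++ [(k, n)]) (x ≠ "") 1
      simp only [List.foldl_cons, pvRLEstep, pvRLEF, List.getLast?_concat, hne, hk, if_false]
      simpa [List.append_assoc] using h2
  
theorem firstTrue_rlef_true (xs : List String) (n : Int) :
    pvFirstTrue (pvRLEF true n xs) = n + pvCountRun xs := by
  induction xs generalizing n with
  | nil => simp [pvRLEF, pvFirstTrue, pvCountRun]
  | cons x rest ih =>
    by_cases hx : x = ""
    · simp [pvRLEF, pvFirstTrue, pvCountRun, hx]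
    · simp only [pvRLEF, pvCountRun, if_neg hx]
      simp only [ne_eq, hx, not_false_eq_true, decide_true, if_pos]
      rw [ih (n + 1)]; ring

theorem firstTrue_rlef_false (xs : List String) (n : Int) :
    pvFirstTrue (pvRLEF false n xs) = pvCountRun (pvDropEmpty xs) := by
  induction xs generalizing n with
  | nil => simp [pvRLEF, pvFirstTrue, pvDropEmpty, pvCountRun]
  | cons x rest ih =>
    by_cases hx : x = ""
    · simpa [pvRLEF, pvDropEmpty, hx] using ih (n + 1)
    · simp [pvRLEF, pvFirstTrue, pvDropEmpty, pvCountRun, hx, firstTrue_rlef_true]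
      ring

theorem runs_agree (xs : List String) : pvFirstTrue (pvRLE xs) = pvLoopA xs 0 := by
  rw [pvLoopA_zero]
  cases xs with
  | nil => rfl
  | cons x rest =>
    have h := foldl_rlestep rest [] (x ≠ "") 1
    by_cases hx : x = ""
    · simp only [pvRLE, List.foldl_cons, pvRLEstep, List.getLast?_nil]
      simp only [List.nil_append] at h ⊢
      rw [h]
      simp [pvDropEmpty, hx, firstTrue_rlef_false]
    · simp only [pvRLE, List.foldl_cons, pvRLEstep, List.getLast?_nil]
      simp only [List.nil_append] at h ⊢
      rw [h]
      simp [pvDropEmpty, pvCountRun, hx, firstTrue_rlef_true]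
      ring

-- ===== VERDICT (by name: the statement is the Claim_ definition above) =====
theorem is_line_meet_req_spec : Claim_equal_is_line_meet_req := by
  intro line_item min_len max_len time_interval _
  unfold Spec_is_line_meet_req is_line_meet_req is_line_meet_req_alt
  rw [runs_agree]
  by_cases h : min_len ≤ pvLoopA line_item 0 * time_interval ∧
      pvLoopA line_item 0 * time_interval ≤ max_len <;> simp [h]
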